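-- pv_equiv track=rewrite | github.com/jackwood1/ipgrok_api | app/utils.py | normalize_gender
-- ===== SOURCE A (Python) =====
-- def normalize_gender(gender: str) -> str:
--     if gender is None or gender == "":
--         return "null"
--     normalized_gender = gender.strip().lower()
--     gender_map = {
--         "male": ["male", "m", "man", "boy"],
--         "female": ["female", "f", "woman", "girl"],
--         "other": ["other", "non-binary", "nonbinary", "nb", "genderqueer", "genderfluid"]
--     }
--     for standard_gender, variations in gender_map.items():
--         if normalized_gender in variations:
--             return standard_gender
--     return "other"
-- ===== SOURCE B (Python) =====
-- # Binary search over a sorted table of (variation, label) pairs instead of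
-- # scanning per-group alias lists.
-- _PAIRS = sorted([
--     ("male", "male"), ("m", "male"), ("man", "male"), ("boy", "male"),
--     ("female", "female"), ("f", "female"), ("woman", "female"), ("girl", "female"),
--     ("other", "other"), ("non-binary", "other"), ("nonbinary", "other"),
--     ("nb", "other"), ("genderqueer", "other"), ("genderfluid", "other"),
-- ])
-- _KEYS = [k for k, _ in _PAIRS]
-- _LABELS = [v for _, v in _PAIRS]
--
--
-- def normalize_gender(gender: str) -> str:
--     if not gender:
--         return "null"
--     s = gender.strip().lower()
--     lo, hi = 0, len(_KEYS)
--     while lo < hi: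
--         mid = (lo + hi) // 2
--         if _KEYS[mid] < s:
--             lo = mid + 1
--         else:
--             hi = mid
--     if lo < len(_KEYS) and _KEYS[lo] == s:
--         return _LABELS[lo]
--     return "other"
-- ===== Notes on version B (the rewrite author's own statement) =====
-- stated objective: alternative
-- what changed: Replaced the loop over three (label, alias-list) groups and its per-group membership scans by one sorted (variation, label) table built once and a hand-written binary search (bisect-left) over it, falling back to the catch-all label when the key is absent.
import Mathlib
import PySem

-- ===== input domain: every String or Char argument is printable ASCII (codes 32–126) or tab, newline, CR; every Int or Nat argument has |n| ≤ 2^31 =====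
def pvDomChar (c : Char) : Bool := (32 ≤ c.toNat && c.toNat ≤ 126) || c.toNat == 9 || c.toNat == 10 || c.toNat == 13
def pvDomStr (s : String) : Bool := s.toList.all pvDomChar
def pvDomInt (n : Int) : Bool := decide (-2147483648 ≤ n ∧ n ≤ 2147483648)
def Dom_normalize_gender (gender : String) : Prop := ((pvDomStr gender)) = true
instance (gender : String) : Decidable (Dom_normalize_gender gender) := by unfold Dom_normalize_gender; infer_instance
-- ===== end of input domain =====

-- B replaces A's loop over (label, alias-list) groups by a binary search over one
-- sorted table of (variation, label) pairs (alternative algorithm; same results).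

-- ===== PORT A =====
-- the for-loop over gender_map.items(): first group containing s wins, else "other"
def normalize_gender_scan (s : String) : List (String × List String) → String
  | [] => "other"
  | (standard, variations) :: rest =>
      if s ∈ variations then standard else normalize_gender_scan s rest

def normalize_gender (gender : String) : String :=
  if gender = "" then "null"
  else
    let normalized := PySem.Str.lower (PySem.Str.strip gender)
    normalize_gender_scan normalized
      [("male", ["male", "m", "man", "boy"]),
       ("female", ["female", "f", "woman", "girl"]),
       ("other", ["other", "non-binary", "nonbinary", "nb", "genderqueer", "genderfluid"])]

-- ===== PORT B =====
-- the sorted key/label tables (Source B builds them once at module load);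
-- keys are kept as char lists: Python's str '<' is exactly Lean's '<' on .toList (PYSEM)
def genderKeys : List (List Char) :=
  ["boy".toList, "f".toList, "female".toList, "genderfluid".toList,
   "genderqueer".toList, "girl".toList, "m".toList, "male".toList,
   "man".toList, "nb".toList, "non-binary".toList, "nonbinary".toList,
   "other".toList, "woman".toList]

def genderLabels : List String :=
  ["male", "female", "female", "other", "other", "female", "male",
   "male", "male", "other", "other", "other", "other", "female"]

-- Source B's while-loop binary search; the fuel only bounds the iteration count (14 ≥ any run)
def genderBsearch (s : List Char) : Nat → Nat → Nat → Nat
  | 0, lo, _ => lo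
  | fuel + 1, lo, hi =>
      if lo < hi then
        let mid := (lo + hi) / 2
        if genderKeys.getD mid [] < s then genderBsearch s fuel (mid + 1) hi
        else genderBsearch s fuel lo mid
      else lo

def normalize_gender_alt (gender : String) : String :=
  if gender = "" then "null"
  else
    let s := (PySem.Str.lower (PySem.Str.strip gender)).toList
    let lo := genderBsearch s 14 0 genderKeys.length
    if lo < genderKeys.length ∧ genderKeys.getD lo [] = s then genderLabels.getD lo "other"
    else "other"

-- ===== PRECONDITION & SPEC =====
def Spec_normalize_gender (gender : String) (out : String) : Prop := out = normalize_gender_alt gender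
instance (gender : String) (out : String) : Decidable (Spec_normalize_gender gender out) := by unfold Spec_normalize_gender; infer_instance

-- ===== CLAIM (what is proved, stated in full; the proofs are below) =====
def Claim_equal_normalize_gender : Prop := ∀ (gender : String), Dom_normalize_gender gender → Spec_normalize_gender gender (normalize_gender gender)

-- ===== LEMMAS AND PROOFS =====
set_option maxHeartbeats 2000000 in
theorem scan_eq_bsearch (s : String) :
    normalize_gender_scan s
      [("male", ["male", "m", "man", "boy"]),
       ("female", ["female", "f", "woman", "girl"]),
       ("other", ["other", "non-binary", "nonbinary", "nb", "genderqueer", "genderfluid"])]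
      = (if genderBsearch s.toList 14 0 genderKeys.length < genderKeys.length ∧
            genderKeys.getD (genderBsearch s.toList 14 0 genderKeys.length) [] = s.toList
         then genderLabels.getD (genderBsearch s.toList 14 0 genderKeys.length) "other"
         else "other") := by
  by_cases h0 : s.toList = "male".toList
  · rw [String.toList_inj.mp h0]; decide
  by_cases h1 : s.toList = "m".toList
  · rw [String.toList_inj.mp h1]; decide
  by_cases h2 : s.toList = "man".toList
  · rw [String.toList_inj.mp h2]; decide
  by_cases h3 : s.toList = "boy".toList
  · rw [String.toList_inj.mp h3]; decide
  by_cases h4 : s.toList = "female".toList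
  · rw [String.toList_inj.mp h4]; decide
  by_cases h5 : s.toList = "f".toList
  · rw [String.toList_inj.mp h5]; decide
  by_cases h6 : s.toList = "woman".toList
  · rw [String.toList_inj.mp h6]; decide
  by_cases h7 : s.toList = "girl".toList
  · rw [String.toList_inj.mp h7]; decide
  by_cases h8 : s.toList = "other".toList
  · rw [String.toList_inj.mp h8]; decide
  by_cases h9 : s.toList = "non-binary".toList
  · rw [String.toList_inj.mp h9]; decide
  by_cases h10 : s.toList = "nonbinary".toList
  · rw [String.toList_inj.mp h10]; decide
  by_cases h11 : s.toList = "nb".toList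
  · rw [String.toList_inj.mp h11]; decide
  by_cases h12 : s.toList = "genderqueer".toList
  · rw [String.toList_inj.mp h12]; decide
  by_cases h13 : s.toList = "genderfluid".toList
  · rw [String.toList_inj.mp h13]; decide
  -- s matches no key: the scan falls through, and the search's final equality test fails
  have hne : ∀ t : String, s.toList ≠ t.toList → s ≠ t := fun t h he => h (by rw [he])
  have hscan : normalize_gender_scan s
      [("male", ["male", "m", "man", "boy"]),
       ("female", ["female", "f", "woman", "girl"]),
       ("other", ["other", "non-binary", "nonbinary", "nb", "genderqueer", "genderfluid"])] = "other" := by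
    simp [normalize_gender_scan, hne _ h0, hne _ h1, hne _ h2, hne _ h3, hne _ h4, hne _ h5,
      hne _ h6, hne _ h7, hne _ h8, hne _ h9, hne _ h10, hne _ h11, hne _ h12, hne _ h13]
  rw [hscan, if_neg]
  rintro ⟨hlt, heq⟩
  have hm : genderKeys.getD (genderBsearch s.toList 14 0 genderKeys.length) [] ∈ genderKeys := by
    rw [List.getD_eq_getElem _ _ hlt]
    exact List.getElem_mem _
  rw [heq] at hm
  simp only [genderKeys, List.mem_cons, List.not_mem_nil, or_false] at hm
  tauto

-- ===== VERDICT (by name: the statement is the Claim_ definition above) =====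
theorem normalize_gender_spec : Claim_equal_normalize_gender := by
  intro gender _
  unfold Spec_normalize_gender normalize_gender normalize_gender_alt
  split_ifs with h
  · rfl
  · exact scan_eq_bsearch _
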